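-- pv_equiv track=rewrite | github.com/jpaulc34/pytest_adaca | technical_test.py | max_repeat
-- ===== SOURCE A (Python) =====
-- def max_repeat(numbers):
--     filtered_res = (0,0)
--
--     for index, x in enumerate(numbers):
--         max_freq = 0
--         most_frequent_digit = x % 10
--
--         while x > 0:
--             digit = x % 10
--             count = 0
--             temp = x
--             while temp > 0:
--                 if temp % 10 == digit:
--                     count += 1
--                 temp //= 10
--             if count > max_freq:
--                 max_freq = count
--                 most_frequent_digit = digit
--             x //= 10
--         res = (max_freq, most_frequent_digit, index)
--
--         if res[0] > filtered_res[0]: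
--             filtered_res = res
--
--     return numbers[filtered_res[2]]
-- ===== SOURCE B (Python) =====
-- def max_repeat(numbers):
--     best_freq = 0
--     best_index = None
--     for index, x in enumerate(numbers):
--         counts = {}
--         while x > 0:
--             d = x % 10
--             counts[d] = counts.get(d, 0) + 1
--             x //= 10
--         freq = 0
--         for c in counts.values():
--             if c > freq:
--                 freq = c
--         if freq > best_freq:
--             best_freq = freq
--             best_index = index
--     return numbers[best_index]
-- ===== Notes on version B (the rewrite author's own statement) =====
-- stated objective: alternative
-- what changed: The quadratic inner scan (for each remaining digit, rescan the whole remaining number to count it) is replaced by a single pass per number that tallies digits into a dict and then takes the largest tally; inputs with no positive element, where A raises IndexError indexing its sentinel pair, are excluded by Pre_.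
import Mathlib
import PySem

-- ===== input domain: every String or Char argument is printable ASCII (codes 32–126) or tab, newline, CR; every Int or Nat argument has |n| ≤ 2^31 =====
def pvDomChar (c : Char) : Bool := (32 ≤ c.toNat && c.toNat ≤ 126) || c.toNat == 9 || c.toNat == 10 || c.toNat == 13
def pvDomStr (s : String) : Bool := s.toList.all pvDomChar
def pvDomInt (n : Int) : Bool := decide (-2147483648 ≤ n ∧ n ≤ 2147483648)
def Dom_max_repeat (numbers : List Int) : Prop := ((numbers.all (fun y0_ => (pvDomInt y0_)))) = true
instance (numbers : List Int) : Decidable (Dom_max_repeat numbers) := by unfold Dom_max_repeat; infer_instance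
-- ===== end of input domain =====

-- B replaces A's quadratic inner digit-count rescans by one dict-tally pass per number;
-- the return value is proved equal on all inputs with a positive element.

-- termination helper for the digit-stripping loops (x //= 10)
theorem pvDigits_lt (x : Int) (h : 0 < x) : (PySem.Int.floordiv x 10).toNat < x.toNat := by
  rw [PySem.Int.floordiv_eq_ediv_of_pos (by omega)]
  omega

-- ===== PORT A =====
-- inner 'while temp > 0' counting loop
def pvCountLoop (temp digit count : Int) : Int :=
  if h : 0 < temp then
    pvCountLoop (PySem.Int.floordiv temp 10) digit
      (if PySem.Int.mod temp 10 == digit then count + 1 else count)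
  else count
termination_by temp.toNat
decreasing_by exact pvDigits_lt temp h

-- middle 'while x > 0' loop carrying (max_freq, most_frequent_digit)
def pvWhileLoop (x maxFreq mfd : Int) : Int × Int :=
  if h : 0 < x then
    let digit := PySem.Int.mod x 10
    let count := pvCountLoop x digit 0
    if count > maxFreq then pvWhileLoop (PySem.Int.floordiv x 10) count digit
    else pvWhileLoop (PySem.Int.floordiv x 10) maxFreq mfd
  else (maxFreq, mfd)
termination_by x.toNat
decreasing_by all_goals exact pvDigits_lt x h

def max_repeat (numbers : List Int) : Int :=
  let fr := (PySem.List.enumerate numbers).foldl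
    (fun (fr : Int × Int × Option Int) p =>
      let r := pvWhileLoop p.2 0 (PySem.Int.mod p.2 10)
      if r.1 > fr.1 then (r.1, r.2, some p.1) else fr)
    (0, 0, none)
  match fr.2.2 with
  | some i => (PySem.List.pyGet? numbers i).getD 0  -- in-range under Pre_; default unreachable
  | none => 0  -- Python: IndexError on the sentinel pair; excluded by Pre_

-- ===== PORT B =====
-- 'while x > 0' dict-tally loop
def pvCountsLoop (x : Int) (counts : PySem.Dict Int Int) : PySem.Dict Int Int :=
  if h : 0 < x then
    pvCountsLoop (PySem.Int.floordiv x 10)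
      (counts.insert (PySem.Int.mod x 10) (counts.getD (PySem.Int.mod x 10) 0 + 1))
  else counts
termination_by x.toNat
decreasing_by exact pvDigits_lt x h

def max_repeat_alt (numbers : List Int) : Int :=
  let st := (PySem.List.enumerate numbers).foldl
    (fun (st : Int × Option Int) p =>
      let counts := pvCountsLoop p.2 PySem.Dict.empty
      let freq := counts.values.foldl (fun f c => if c > f then c else f) 0
      if freq > st.1 then (freq, some p.1) else st)
    (0, none)
  match st.2 with
  | some i => (PySem.List.pyGet? numbers i).getD 0  -- in-range under Pre_; default unreachable
  | none => 0  -- Python: TypeError (best_index is None); excluded by Pre_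

-- ===== PRECONDITION & SPEC =====
-- Pre_ excludes exactly the inputs with no positive element: there A never updates its
-- sentinel pair and raises IndexError indexing its third component (B raises TypeError).
def Pre_max_repeat (numbers : List Int) : Prop := ∃ x ∈ numbers, 0 < x
instance (numbers : List Int) : Decidable (Pre_max_repeat numbers) := by
  unfold Pre_max_repeat; infer_instance
def pvWitness_max_repeat : List Int := [122, 3]

def Spec_max_repeat (numbers : List Int) (out : Int) : Prop := out = max_repeat_alt numbers
instance (numbers : List Int) (out : Int) : Decidable (Spec_max_repeat numbers out) := by
  unfold Spec_max_repeat; infer_instance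

-- ===== CLAIM (what is proved, stated in full; the proofs are below) =====
def Claim_equal_max_repeat : Prop := ∀ (numbers : List Int), Dom_max_repeat numbers → Pre_max_repeat numbers → Spec_max_repeat numbers (max_repeat numbers)

-- ===== LEMMAS AND PROOFS =====

-- list of decimal digits of x, least significant first (empty for x ≤ 0)
def pvDigits (x : Int) : List Int :=
  if h : 0 < x then PySem.Int.mod x 10 :: pvDigits (PySem.Int.floordiv x 10) else []
termination_by x.toNat
decreasing_by exact pvDigits_lt x h

-- A's running maximum of "count of the leading digit in the remaining suffix"
def pvN : List Int → Int
  | [] => 0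
  | h :: t => max ((h :: t).count h : Int) (pvN t)

theorem pvCountLoop_eq (temp digit count : Int) :
    pvCountLoop temp digit count = count + ((pvDigits temp).count digit : Int) := by
  by_cases h : 0 < temp
  · rw [pvCountLoop, pvDigits]
    simp only [h, dif_pos, List.count_cons]
    rw [pvCountLoop_eq (PySem.Int.floordiv temp 10)]
    split_ifs <;> push_cast <;> omega
  · rw [pvCountLoop, pvDigits]; simp [h]
termination_by temp.toNat
decreasing_by exact pvDigits_lt temp h

theorem pvN_nonneg (l : List Int) : 0 ≤ pvN l := by
  induction l with
  | nil => simp [pvN]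
  | cons h t ih => simp only [pvN]; positivity

theorem pvWhileLoop_fst (x m d : Int) (hm : 0 ≤ m) :
    (pvWhileLoop x m d).1 = max m (pvN (pvDigits x)) := by
  by_cases h : 0 < x
  · have hd10 : pvDigits x = PySem.Int.mod x 10 :: pvDigits (PySem.Int.floordiv x 10) := by
      rw [pvDigits]; simp [h]
    rw [pvWhileLoop]
    simp only [h, dif_pos]
    rw [pvCountLoop_eq, hd10]
    simp only [pvN, zero_add]
    split_ifs with hc
    · rw [pvWhileLoop_fst _ _ _ (Int.natCast_nonneg _)]
      omega
    · rw [pvWhileLoop_fst _ _ _ hm]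
      omega
  · rw [pvWhileLoop, pvDigits]
    simp only [h, dif_neg, not_false_iff, pvN]
    omega
termination_by x.toNat
decreasing_by all_goals exact pvDigits_lt x h

theorem pvCountsLoop_eq (x : Int) (d : PySem.Dict Int Int) :
    pvCountsLoop x d = (pvDigits x).foldl (fun d a => d.insert a (d.getD a 0 + 1)) d := by
  by_cases h : 0 < x
  · rw [pvCountsLoop, pvDigits]
    simp only [h, dif_pos, List.foldl_cons]
    exact pvCountsLoop_eq (PySem.Int.floordiv x 10) _
  · rw [pvCountsLoop, pvDigits]; simp [h]
termination_by x.toNat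
decreasing_by exact pvDigits_lt x h

-- facts about the running-max fold
theorem pvFoldMax_init_le (l : List Int) (a : Int) :
    a ≤ l.foldl (fun f c => if c > f then c else f) a := by
  induction l generalizing a with
  | nil => simp
  | cons h t ih =>
    simp only [List.foldl_cons]
    refine le_trans ?_ (ih _)
    split_ifs <;> omega

theorem pvFoldMax_mem_le (l : List Int) (a c : Int) (hc : c ∈ l) :
    c ≤ l.foldl (fun f c => if c > f then c else f) a := by
  induction l generalizing a with
  | nil => simp at hc
  | cons h t ih =>
    simp only [List.foldl_cons]
    rcases List.mem_cons.mp hc with rfl | hct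
    · refine le_trans ?_ (pvFoldMax_init_le t _)
      split_ifs <;> omega
    · exact ih _ hct

theorem pvFoldMax_cases (l : List Int) (a : Int) :
    l.foldl (fun f c => if c > f then c else f) a = a ∨
      l.foldl (fun f c => if c > f then c else f) a ∈ l := by
  induction l generalizing a with
  | nil => simp
  | cons h t ih =>
    simp only [List.foldl_cons]
    split_ifs with hh
    · rcases ih h with heq | hmem
      · right; simp [heq]
      · right; exact List.mem_cons_of_mem _ hmem
    · rcases ih a with heq | hmem
      · left; exact heq
      · right; exact List.mem_cons_of_mem _ hmem

-- facts about A's running maximum pvN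
theorem pvCount_le_pvN (l : List Int) (d : Int) (hd : d ∈ l) :
    (l.count d : Int) ≤ pvN l := by
  induction l with
  | nil => simp at hd
  | cons h t ih =>
    rcases List.mem_cons.mp hd with rfl | hdt
    · simp [pvN]
    · by_cases hh : d = h
      · subst hh; simp [pvN]
      · have hh' : ¬ h = d := fun e => hh e.symm
        have hcc : (h :: t).count d = t.count d := by simp [hh']
        calc ((h :: t).count d : Int) = (t.count d : Int) := by rw [hcc]
        _ ≤ pvN t := ih hdt
        _ ≤ pvN (h :: t) := by simp only [pvN]; omega

theorem pvN_cases (l : List Int) :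
    pvN l = 0 ∨ ∃ d ∈ l, pvN l = (l.count d : Int) := by
  induction l with
  | nil => left; rfl
  | cons h t ih =>
    rcases le_or_gt (pvN t) ((h :: t).count h : Int) with hle | hgt
    · right
      refine ⟨h, List.mem_cons_self, ?_⟩
      simp only [pvN]; omega
    · have hmax : pvN (h :: t) = pvN t := by simp only [pvN]; omega
      rcases ih with h0 | ⟨d, hd, hcnt⟩
      · left; rw [hmax, h0]
      · right
        by_cases hh : d = h
        · subst hh
          have h1 : ((d :: t).count d : Int) = (t.count d : Int) + 1 := by
            simp
          rw [hcnt] at hgt; omega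
        · refine ⟨d, List.mem_cons_of_mem _ hd, ?_⟩
          have hh' : ¬ h = d := fun e => hh e.symm
          have hcc : (h :: t).count d = t.count d := by simp [hh']
          rw [hmax, hcnt, hcc]

-- the two per-number frequency computations agree: pvN l = max of the digit tallies
theorem pvN_eq_foldMax (l : List Int) :
    pvN l = ((PySem.Set.ofList l).map (fun k => (l.count k : Int))).foldl
      (fun f c => if c > f then c else f) 0 := by
  apply le_antisymm
  · rcases pvN_cases l with h0 | ⟨d, hd, hcnt⟩
    · rw [h0]; exact pvFoldMax_init_le _ _
    · rw [hcnt]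
      apply pvFoldMax_mem_le
      exact List.mem_map.mpr ⟨d, (PySem.Set.mem_ofList _ _).mpr hd, rfl⟩
  · rcases pvFoldMax_cases ((PySem.Set.ofList l).map (fun k => (l.count k : Int))) 0 with heq | hmem
    · rw [heq]; exact pvN_nonneg l
    · rcases List.mem_map.mp hmem with ⟨d, hd, hcd⟩
      rw [← hcd]
      exact pvCount_le_pvN l d ((PySem.Set.mem_ofList _ _).mp hd)

-- B's per-number frequency equals pvN of the digit list
theorem pvFreqB_eq (x : Int) :
    (pvCountsLoop x PySem.Dict.empty).values.foldl (fun f c => if c > f then c else f) 0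
      = pvN (pvDigits x) := by
  rw [pvCountsLoop_eq, PySem.Dict.foldl_insert_getD_add_one_eq_counter]
  rw [pvN_eq_foldMax]
  congr 1
  show (PySem.Dict.counter (pvDigits x)).items.map (·.2) = _
  rw [PySem.Dict.items_counter, List.map_map]
  rfl

-- A's per-number frequency equals pvN of the digit list
theorem pvFreqA_eq (x : Int) :
    (pvWhileLoop x 0 (PySem.Int.mod x 10)).1 = pvN (pvDigits x) := by
  rw [pvWhileLoop_fst x 0 _ le_rfl]
  exact max_eq_right (pvN_nonneg _)

-- the two outer folds keep equal (best_freq, best_index) states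
theorem pvFold_rel (l : List (Int × Int)) (f d : Int) (i : Option Int) :
    (l.foldl (fun (fr : Int × Int × Option Int) p =>
        let r := pvWhileLoop p.2 0 (PySem.Int.mod p.2 10)
        if r.1 > fr.1 then (r.1, r.2, some p.1) else fr) (f, d, i)).2.2
      = (l.foldl (fun (st : Int × Option Int) p =>
          let counts := pvCountsLoop p.2 PySem.Dict.empty
          let freq := counts.values.foldl (fun f c => if c > f then c else f) 0
          if freq > st.1 then (freq, some p.1) else st) (f, i)).2 ∧
    (l.foldl (fun (fr : Int × Int × Option Int) p =>
        let r := pvWhileLoop p.2 0 (PySem.Int.mod p.2 10)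
        if r.1 > fr.1 then (r.1, r.2, some p.1) else fr) (f, d, i)).1
      = (l.foldl (fun (st : Int × Option Int) p =>
          let counts := pvCountsLoop p.2 PySem.Dict.empty
          let freq := counts.values.foldl (fun f c => if c > f then c else f) 0
          if freq > st.1 then (freq, some p.1) else st) (f, i)).1 := by
  induction l generalizing f d i with
  | nil => exact ⟨rfl, rfl⟩
  | cons p t ih =>
    simp only [List.foldl_cons]
    have hfreq : (pvCountsLoop p.2 PySem.Dict.empty).values.foldl
        (fun f c => if c > f then c else f) 0 = (pvWhileLoop p.2 0 (PySem.Int.mod p.2 10)).1 := by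
      rw [pvFreqB_eq, pvFreqA_eq]
    rw [hfreq]
    split_ifs with h
    · exact ih _ _ _
    · exact ih _ _ _

theorem pvMain (numbers : List Int) : max_repeat numbers = max_repeat_alt numbers := by
  unfold max_repeat max_repeat_alt
  obtain ⟨h2, _⟩ := pvFold_rel (PySem.List.enumerate numbers) 0 0 none
  simp only []
  rw [h2]

-- ===== VERDICT (by name: the statement is the Claim_ definition above) =====
theorem max_repeat_spec : Claim_equal_max_repeat := by
  intro numbers _ _
  unfold Spec_max_repeat
  exact pvMain numbers
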